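-- pv_equiv track=rewrite | github.com/Sabdha07/Bioinformatics-Algorithms | bioinfo_chapter2_motiffind.py | patterncount_with_mismatch
-- ===== SOURCE A (Python) =====
-- def hamming_distance(p,q):
--     d = 0
--     if len(p) == len(q):
--       for i in range(len(p)):
--         if p[i] != q[i]:
--           d += 1
--     return d
--
-- def approximate_pattern_matching(seq, kmer, d): #approximate text matching
--     flag = False
--     if len(seq) == len(kmer):
--       if hamming_distance(kmer,seq) <= d:
--         flag = True
--     return flag
--
-- def patterncount_with_mismatch(string,pattern,d):
--   k = len(pattern)
--   l = len(string)
--   count = 0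
--   for i in range(l-k+1):
--     if approximate_pattern_matching(string[i:i+k],pattern,d):
--       count += 1
--   return count
-- ===== SOURCE B (Python) =====
-- def patterncount_with_mismatch(string, pattern, d):
--     k = len(pattern)
--     dist = [0] * (len(string) - k + 1)
--     for j in range(k):
--         for i in range(len(dist)):
--             if pattern[j] != string[i + j]:
--                 dist[i] += 1
--     return sum(1 for x in dist if x <= d)
-- ===== Notes on version B (the rewrite author's own statement) =====
-- stated objective: alternative
-- what changed: Replaces A's per-window helper calls (slice each window, compare it character by character) with a column-wise pass that builds a table of per-window mismatch counts in place, followed by a separate pass counting entries <= d.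
import Mathlib
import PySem

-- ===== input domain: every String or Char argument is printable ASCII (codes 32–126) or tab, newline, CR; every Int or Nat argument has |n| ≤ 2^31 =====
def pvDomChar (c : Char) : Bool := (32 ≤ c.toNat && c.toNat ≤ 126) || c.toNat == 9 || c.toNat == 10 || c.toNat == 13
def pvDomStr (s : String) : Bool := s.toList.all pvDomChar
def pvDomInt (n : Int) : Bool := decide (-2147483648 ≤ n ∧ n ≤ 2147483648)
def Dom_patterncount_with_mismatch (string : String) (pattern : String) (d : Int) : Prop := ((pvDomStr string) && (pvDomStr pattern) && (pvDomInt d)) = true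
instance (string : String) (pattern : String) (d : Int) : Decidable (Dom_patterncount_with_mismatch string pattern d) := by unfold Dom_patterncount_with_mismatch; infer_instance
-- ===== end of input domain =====

-- B replaces A's per-window helper calls by a column-wise mismatch table built in place and a
-- separate counting pass (objective: alternative decomposition, same asymptotic cost).

-- ===== PORT A =====
def pvHammingDistance (p q : List Char) : Int :=
  let d : Int := 0
  if p.length = q.length then
    (PySem.List.pyRange 0 (p.length : Int) 1).foldl
      (fun d i => if PySem.List.pyGetD p i ' ' ≠ PySem.List.pyGetD q i ' ' then d + 1 else d) d
  else d

def pvApproxMatch (seq kmer : List Char) (d : Int) : Bool :=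
  let flag := false
  if seq.length = kmer.length then
    if pvHammingDistance kmer seq ≤ d then true else flag
  else flag

def patterncount_with_mismatch (string : String) (pattern : String) (d : Int) : Int :=
  let s := string.toList
  let p := pattern.toList
  let k : Int := p.length
  let l : Int := s.length
  (PySem.List.pyRange 0 (l - k + 1) 1).foldl
    (fun count i =>
      if pvApproxMatch (PySem.List.slice s (some i) (some (i + k))) p d then count + 1 else count)
    0

-- ===== PORT B =====
def patterncount_with_mismatch_alt (string : String) (pattern : String) (d : Int) : Int :=
  let s := string.toList
  let p := pattern.toList
  let k : Int := p.length
  let dist : List Int := List.replicate ((s.length : Int) - k + 1).toNat 0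
  let dist := (PySem.List.pyRange 0 k 1).foldl
    (fun dist j =>
      (PySem.List.pyRange 0 (dist.length : Int) 1).foldl
        (fun dist i =>
          if PySem.List.pyGetD p j ' ' ≠ PySem.List.pyGetD s (i + j) ' '
          then PySem.List.pySetD dist i (PySem.List.pyGetD dist i 0 + 1)
          else dist)
        dist)
    dist
  dist.foldl (fun c x => if x ≤ d then c + 1 else c) 0

-- ===== PRECONDITION & SPEC =====
def Spec_patterncount_with_mismatch (string : String) (pattern : String) (d : Int) (out : Int) : Prop := out = patterncount_with_mismatch_alt string pattern d
instance (string : String) (pattern : String) (d : Int) (out : Int) : Decidable (Spec_patterncount_with_mismatch string pattern d out) := by unfold Spec_patterncount_with_mismatch; infer_instance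

-- ===== CLAIM (what is proved, stated in full; the proofs are below) =====
def Claim_equal_patterncount_with_mismatch : Prop := ∀ (string : String) (pattern : String) (d : Int), Dom_patterncount_with_mismatch string pattern d → Spec_patterncount_with_mismatch string pattern d (patterncount_with_mismatch string pattern d)

-- ===== LEMMAS AND PROOFS =====

-- per-window mismatch predicate and count
def pvMis (s p : List Char) (i j : Nat) : Bool := decide (p.getD j ' ' ≠ s.getD (i + j) ' ')
def pvCnt (s p : List Char) (i m : Nat) : Nat := (List.range m).countP (pvMis s p i)

-- effect of one inner pass (one column) of B
def pvUpd (g : Int → Bool) : List Int → Nat → List Int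
  | [], _ => []
  | x :: rest, base => (if g base then x + 1 else x) :: pvUpd g rest (base + 1)

theorem pvUpd_length (g : Int → Bool) : ∀ (L : List Int) (base : Nat), (pvUpd g L base).length = L.length := by
  intro L
  induction L with
  | nil => intro base; rfl
  | cons x rest ih => intro base; simp [pvUpd, ih]

theorem pvUpd_getElem (g : Int → Bool) : ∀ (L : List Int) (base t : Nat) (ht : t < L.length),
    (pvUpd g L base)[t]'(by rw [pvUpd_length]; exact ht)
      = if g (base + t) then L[t] + 1 else L[t] := by
  intro L
  induction L with
  | nil => intro base t ht; simp at ht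
  | cons x rest ih =>
    intro base t ht
    cases t with
    | zero => simp [pvUpd]
    | succ t' =>
      have h := ih (base + 1) t' (by simpa using ht)
      have e : ((base + 1 : Nat) : Int) + (t' : Int) = (base : Int) + ((t' + 1 : Nat) : Int) := by
        push_cast; ring
      rw [e] at h
      simpa [pvUpd] using h

theorem pvInner_aux (g : Int → Bool) : ∀ (suf pre : List Int),
    (PySem.List.pyRange (pre.length : Int) ((pre.length : Int) + (suf.length : Int)) 1).foldl
      (fun dt i => if g i then PySem.List.pySetD dt i (PySem.List.pyGetD dt i 0 + 1) else dt)
      (pre ++ suf)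
    = pre ++ pvUpd g suf pre.length := by
  intro suf
  induction suf with
  | nil =>
    intro pre
    rw [PySem.List.pyRange_one_eq_nil (by simp)]
    simp [pvUpd]
  | cons x rest ih =>
    intro pre
    have hlt : (pre.length : Int) < (pre.length : Int) + (((x :: rest).length : Nat) : Int) := by
      simp
    rw [PySem.List.pyRange_one_cons hlt]
    simp only [List.foldl_cons]
    have hget : PySem.List.pyGetD (pre ++ x :: rest) ((pre.length : Nat) : Int) 0 = x := by
      rw [PySem.List.pyGetD_natCast]
      simp
    have hset : ∀ v : Int, PySem.List.pySetD (pre ++ x :: rest) ((pre.length : Nat) : Int) v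
        = pre ++ v :: rest := by
      intro v
      rw [PySem.List.pySetD_natCast]
      simp [List.set_append_right]
    have hstep : (if g (pre.length : Int)
          then PySem.List.pySetD (pre ++ x :: rest) ((pre.length : Nat) : Int)
                 (PySem.List.pyGetD (pre ++ x :: rest) ((pre.length : Nat) : Int) 0 + 1)
          else pre ++ x :: rest)
        = (pre ++ [if g (pre.length : Int) then x + 1 else x]) ++ rest := by
      by_cases hg : g (pre.length : Int) = true
      · simp [hg, hget, hset]
      · simp [hg]
    rw [hstep]
    have hend1 : ((pre.length : Nat) : Int) + 1 = (((pre ++ [if g (pre.length : Int) then x + 1 else x]).length : Nat) : Int) := by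
      simp
    have hend2 : ((pre.length : Nat) : Int) + (((x :: rest).length : Nat) : Int)
        = (((pre ++ [if g (pre.length : Int) then x + 1 else x]).length : Nat) : Int) + ((rest.length : Nat) : Int) := by
      simp; ring
    rw [hend1, hend2, ih]
    simp [pvUpd]

theorem pvInner (g : Int → Bool) (dt : List Int) :
    (PySem.List.pyRange 0 ((dt.length : Int)) 1).foldl
      (fun dt i => if g i then PySem.List.pySetD dt i (PySem.List.pyGetD dt i 0 + 1) else dt) dt
    = pvUpd g dt 0 := by
  have := pvInner_aux g dt []
  simpa using this

theorem pvWindow_eq (s p : List Char) (d : Int) (i : Nat) (hi : i + p.length ≤ s.length) :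
    pvApproxMatch (PySem.List.slice s (some (i : Int)) (some ((i : Int) + (p.length : Int)))) p d
    = decide ((pvCnt s p i p.length : Int) ≤ d) := by
  have hslice := PySem.List.slice_natCast_add s i p.length
  rw [hslice]
  have hW : ((s.drop i).take p.length).length = p.length := by simp; omega
  have hgetW : ∀ t, t < p.length → ((s.drop i).take p.length).getD t ' ' = s.getD (i + t) ' ' := by
    intro t ht
    have h1 : t < ((s.drop i).take p.length).length := by rw [hW]; exact ht
    have h2 : i + t < s.length := by omega
    rw [List.getD_eq_getElem?_getD, List.getD_eq_getElem?_getD,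
        List.getElem?_eq_getElem h1, List.getElem?_eq_getElem h2]
    simp [List.getElem_take, List.getElem_drop]
  unfold pvApproxMatch pvHammingDistance
  rw [if_pos hW, if_pos hW.symm]
  rw [PySem.List.pyRange_zero_nat p.length, List.foldl_map]
  simp only [PySem.List.pyGetD_natCast]
  have hfold := PySem.List.foldl_count_if
      (fun t : Nat => decide (p.getD t ' ' ≠ ((s.drop i).take p.length).getD t ' '))
      (List.range p.length) 0
  simp only [decide_eq_true_eq, ne_eq] at hfold
  rw [show (fun (x : Int) (y : Nat) => if p.getD y ' ' ≠ ((s.drop i).take p.length).getD y ' ' then x + 1 else x)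
        = fun (x : Int) (y : Nat) => if ¬ p.getD y ' ' = ((s.drop i).take p.length).getD y ' ' then x + 1 else x from rfl]
  rw [hfold]
  have hcount : (List.range p.length).countP
      (fun t : Nat => decide (p.getD t ' ' ≠ ((s.drop i).take p.length).getD t ' '))
      = pvCnt s p i p.length := by
    unfold pvCnt
    apply List.countP_congr
    intro t htmem
    have ht : t < p.length := List.mem_range.mp htmem
    have h := hgetW t ht
    simp only [List.getD_eq_getElem?_getD] at h
    simp [pvMis, List.getD_eq_getElem?_getD, h]
  rw [hcount]
  simp

theorem pvA_eq (string pattern : String) (d : Int) :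
    patterncount_with_mismatch string pattern d
    = ((List.range ((string.toList.length : Int) - (pattern.toList.length : Int) + 1).toNat).countP
        (fun t => decide ((pvCnt string.toList pattern.toList t pattern.toList.length : Int) ≤ d)) : Int) := by
  show (PySem.List.pyRange 0 ((string.toList.length : Int) - (pattern.toList.length : Int) + 1) 1).foldl
      (fun count i =>
        if pvApproxMatch (PySem.List.slice string.toList (some i) (some (i + (pattern.toList.length : Int)))) pattern.toList d
        then count + 1 else count) 0 = _
  rw [PySem.List.pyRange_one, List.foldl_map]
  simp only [zero_add, sub_zero]
  rw [PySem.List.foldl_count_if]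
  rw [zero_add]
  congr 1
  apply List.countP_congr
  intro t htmem
  have ht : t < ((string.toList.length : Int) - (pattern.toList.length : Int) + 1).toNat :=
    List.mem_range.mp htmem
  have hi : t + pattern.toList.length ≤ string.toList.length := by omega
  rw [pvWindow_eq string.toList pattern.toList d t hi]

theorem pvUpd_map_cnt (s p : List Char) (m n : Nat) :
    pvUpd (fun i => decide (PySem.List.pyGetD p ((m : Nat) : Int) ' ' ≠ PySem.List.pyGetD s (i + ((m : Nat) : Int)) ' '))
      ((List.range n).map (fun i => (pvCnt s p i m : Int))) 0
    = (List.range n).map (fun i => (pvCnt s p i (m + 1) : Int)) := by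
  apply List.ext_getElem
  · simp [pvUpd_length]
  · intro t h1 h2
    rw [pvUpd_getElem]
    · simp only [List.getElem_map, List.getElem_range]
      have harg : ((0 : Nat) : Int) + (t : Int) + ((m : Nat) : Int) = ((t + m : Nat) : Int) := by
        push_cast; ring
      rw [harg, PySem.List.pyGetD_natCast, PySem.List.pyGetD_natCast]
      have hcnt : pvCnt s p t (m + 1) = pvCnt s p t m + (if pvMis s p t m then 1 else 0) := by
        unfold pvCnt
        rw [List.range_succ, List.countP_append]
        simp [List.countP_cons]
      rw [hcnt]
      by_cases hmis : p[m]?.getD ' ' = s[t + m]?.getD ' '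
      all_goals
        simp [pvMis, List.getD_eq_getElem?_getD, hmis]
        rw [List.getElem_map, List.getElem_range]
    · simpa using h2

theorem pvOuterInv (s p : List Char) (n : Nat) : ∀ (m : Nat),
    (List.range m).foldl
      (fun dt (j : Nat) =>
        (PySem.List.pyRange 0 ((dt.length : Nat) : Int) 1).foldl
          (fun dt i =>
            if PySem.List.pyGetD p ((j : Nat) : Int) ' ' ≠ PySem.List.pyGetD s (i + ((j : Nat) : Int)) ' '
            then PySem.List.pySetD dt i (PySem.List.pyGetD dt i 0 + 1)
            else dt)
          dt)
      (List.replicate n 0)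
    = (List.range n).map (fun i => (pvCnt s p i m : Int)) := by
  intro m
  induction m with
  | zero =>
    simp [pvCnt]
  | succ m ih =>
    rw [List.range_succ, List.foldl_append, ih]
    simp only [List.foldl_cons, List.foldl_nil]
    have hin := pvInner
        (fun i => decide (PySem.List.pyGetD p ((m : Nat) : Int) ' ' ≠ PySem.List.pyGetD s (i + ((m : Nat) : Int)) ' '))
        ((List.range n).map (fun i => (pvCnt s p i m : Int)))
    simp only [decide_eq_true_eq] at hin
    rw [hin, pvUpd_map_cnt]

theorem pvB_eq (string pattern : String) (d : Int) :
    patterncount_with_mismatch_alt string pattern d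
    = ((List.range ((string.toList.length : Int) - (pattern.toList.length : Int) + 1).toNat).countP
        (fun t => decide ((pvCnt string.toList pattern.toList t pattern.toList.length : Int) ≤ d)) : Int) := by
  show ((PySem.List.pyRange 0 ((pattern.toList.length : Nat) : Int) 1).foldl
      (fun dist j =>
        (PySem.List.pyRange 0 ((dist.length : Nat) : Int) 1).foldl
          (fun dist i =>
            if PySem.List.pyGetD pattern.toList j ' ' ≠ PySem.List.pyGetD string.toList (i + j) ' '
            then PySem.List.pySetD dist i (PySem.List.pyGetD dist i 0 + 1)
            else dist)
          dist)
      (List.replicate (((string.toList.length : Int) - ((pattern.toList.length : Nat) : Int) + 1)).toNat 0)).foldl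
      (fun c x => if x ≤ d then c + 1 else c) 0 = _
  rw [PySem.List.pyRange_zero_nat, List.foldl_map]
  rw [pvOuterInv string.toList pattern.toList
      (((string.toList.length : Int) - ((pattern.toList.length : Nat) : Int) + 1)).toNat
      pattern.toList.length]
  have hfold := PySem.List.foldl_count_if (fun x : Int => decide (x ≤ d))
      ((List.range (((string.toList.length : Int) - ((pattern.toList.length : Nat) : Int) + 1)).toNat).map
        (fun i => (pvCnt string.toList pattern.toList i pattern.toList.length : Int))) 0
  simp only [decide_eq_true_eq] at hfold
  rw [hfold, zero_add]
  congr 1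
  rw [List.countP_map]
  rfl

-- ===== VERDICT (by name: the statement is the Claim_ definition above) =====
theorem patterncount_with_mismatch_spec : Claim_equal_patterncount_with_mismatch := by
  intro string pattern d _
  unfold Spec_patterncount_with_mismatch
  rw [pvA_eq, pvB_eq]
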